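-- pv_equiv track=rewrite | github.com/CreeperBoom07/USE_Informatics | Задание 8 КОМБИНАТОРИКА/Задачи с КЕГЭ/6985 Средний.py | f
-- ===== SOURCE A (Python) =====
-- def f(s):
--     d = {}
--     for i in s:
--         d[i] = d.get(i, 0) + 1
--     lst = list(d.values())
--
--     if 3 in lst:
--         lst.remove(3)
--         for i in lst:
--             if i > 1:
--                 return False
--         return True
--     else:
--         return False
-- ===== SOURCE B (Python) =====
-- def f(s):
--     distinct = set(s)
--     return sorted(s.count(c) for c in distinct) == [1] * (len(distinct) - 1) + [3]
-- ===== Notes on version B (the rewrite author's own statement) =====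
-- stated objective: idiomatic
-- what changed: Replaces the dict-building loop with its detect-a-3/remove/scan-for->1 procedure by a single closed-form comparison: the sorted list of per-character counts must equal the signature [1]*(distinct-1)+[3].
import Mathlib
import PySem

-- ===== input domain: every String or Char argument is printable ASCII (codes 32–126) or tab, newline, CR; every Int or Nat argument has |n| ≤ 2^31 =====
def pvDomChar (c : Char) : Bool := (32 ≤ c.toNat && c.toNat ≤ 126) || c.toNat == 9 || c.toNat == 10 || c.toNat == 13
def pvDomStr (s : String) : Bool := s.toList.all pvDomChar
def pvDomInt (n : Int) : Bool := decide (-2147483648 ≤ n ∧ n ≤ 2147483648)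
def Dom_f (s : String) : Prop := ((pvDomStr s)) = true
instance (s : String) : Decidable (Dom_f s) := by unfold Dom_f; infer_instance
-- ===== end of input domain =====

-- B replaces A's detect-3/remove/scan procedure by one closed-form comparison of the
-- sorted count list against the signature [1]*(distinct-1)+[3] (objective: idiomatic).

-- ===== PORT A =====
def f (s : String) : Bool :=
  -- d = {}; for i in s: d[i] = d.get(i, 0) + 1
  let d := s.toList.foldl (fun d c => d.insert c (d.getD c 0 + 1)) (PySem.Dict.empty : PySem.Dict Char Int)
  let lst := d.values
  if (3 : Int) ∈ lst then
    match PySem.List.remove? lst 3 with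
    | some rest => !(rest.any (fun i => decide ((1 : Int) < i)))  -- for i in lst: if i > 1: return False / return True
    | none => false  -- unreachable: guarded by the membership test above
  else false

-- ===== PORT B =====
def f_alt (s : String) : Bool :=
  let distinct := PySem.Set.ofList s.toList
  -- s.count(c) for a one-character c is exactly the character count of c in s
  PySem.List.sorted (distinct.map (fun c => (s.toList.count c : Int))) (fun x => x) false
    == List.replicate (distinct.length - 1) (1 : Int) ++ [3]

-- ===== PRECONDITION & SPEC =====
def Spec_f (s : String) (out : Bool) : Prop := out = f_alt s
instance (s : String) (out : Bool) : Decidable (Spec_f s out) := by unfold Spec_f; infer_instance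

-- ===== CLAIM (what is proved, stated in full; the proofs are below) =====
def Claim_equal_f : Prop := ∀ (s : String), Dom_f s → Spec_f s (f s)

-- ===== LEMMAS AND PROOFS =====

-- A's dict-values list is the per-distinct-character count list.
theorem pv_values_eq (xs : List Char) :
    (xs.foldl (fun d c => d.insert c (d.getD c 0 + 1)) (PySem.Dict.empty : PySem.Dict Char Int)).values
      = (PySem.Set.ofList xs).map (fun k => (xs.count k : Int)) := by
  rw [PySem.Dict.foldl_insert_getD_add_one_eq_counter]
  show ((PySem.Dict.counter xs).items).map (·.2) = _
  rw [PySem.Dict.items_counter]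
  simp

-- The core equivalence, on any count list whose entries are all ≥ 1.
theorem pv_core (L : List Int) (h1 : ∀ x ∈ L, 1 ≤ x) :
    (if (3 : Int) ∈ L then
        (match PySem.List.remove? L 3 with
          | some rest => !(rest.any (fun i => decide ((1 : Int) < i)))
          | none => false)
      else false)
      = (PySem.List.sorted L (fun x => x) false
          == List.replicate (L.length - 1) (1 : Int) ++ [3]) := by
  by_cases h3 : (3 : Int) ∈ L
  · rw [if_pos h3, PySem.List.remove?_eq_some_erase L 3 h3]
    show (!(L.erase 3).any (fun i => decide ((1 : Int) < i)))
      = (PySem.List.sorted L (fun x => x) false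
          == List.replicate (L.length - 1) (1 : Int) ++ [3])
    by_cases hall : ∀ x ∈ L.erase 3, x ≤ 1
    · -- A returns True; show the sorted list is exactly the signature.
      have hany : (L.erase 3).any (fun i => decide ((1 : Int) < i)) = false := by
        simp only [List.any_eq_false]
        intro x hx
        simp only [decide_eq_true_eq, not_lt]
        exact hall x hx
      have herase : L.erase 3 = List.replicate (L.length - 1) (1 : Int) := by
        rw [List.eq_replicate_iff]
        refine ⟨by rw [List.length_erase_of_mem h3], ?_⟩
        intro x hx
        have := h1 x (List.mem_of_mem_erase hx)
        have := hall x hx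
        omega
      have hperm : (List.replicate (L.length - 1) (1 : Int) ++ [3]).Perm L := by
        have e2 : (3 :: List.replicate (L.length - 1) (1 : Int)).Perm L := by
          rw [← herase]; exact (List.perm_cons_erase h3).symm
        exact (List.perm_append_singleton _ _).trans e2
      have hpw : (List.replicate (L.length - 1) (1 : Int) ++ [3]).Pairwise (· ≤ ·) := by
        rw [List.pairwise_append]
        refine ⟨List.pairwise_replicate.mpr (by omega), by simp, ?_⟩
        intro a ha b hb
        have := List.eq_of_mem_replicate ha
        simp at hb
        omega
      rw [PySem.List.sorted_id_eq_of_perm_of_pairwise _ _ hperm hpw, hany]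
      simp
    · -- A returns False: some remaining count exceeds 1; the signature cannot match.
      push Not at hall
      obtain ⟨x, hx, hxgt⟩ := hall
      have hany : (L.erase 3).any (fun i => decide ((1 : Int) < i)) = true := by
        simp only [List.any_eq_true]
        exact ⟨x, hx, by simp; omega⟩
      rw [hany]
      simp only [Bool.not_true]
      symm
      rw [beq_eq_false_iff_ne]
      intro heq
      have hperm : L.Perm (List.replicate (L.length - 1) (1 : Int) ++ [3]) := by
        have := (PySem.List.sorted_perm L (fun x => x) false).symm
        rw [heq] at this
        exact this
      have hmem : x ∈ L := List.mem_of_mem_erase hx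
      have hx13 : x = 1 ∨ x = 3 := by
        have hm := hperm.mem_iff.mp hmem
        simp at hm
        tauto
      have hx3 : x = 3 := by rcases hx13 with h | h <;> omega
      have hcount : L.count (3 : Int) = 1 := by
        rw [hperm.count_eq]
        rw [List.count_append, List.count_replicate]
        simp
      have : (L.erase 3).count (3 : Int) = 0 := by
        rw [List.count_erase_self, hcount]
      have : (3 : Int) ∉ L.erase 3 := by
        intro hmem3
        have := List.count_pos_iff.mpr hmem3
        omega
      exact this (hx3 ▸ hx)
  · rw [if_neg h3]
    symm
    rw [beq_eq_false_iff_ne]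
    intro heq
    have : (3 : Int) ∈ PySem.List.sorted L (fun x => x) false := by
      rw [heq]; simp
    rw [PySem.List.mem_sorted] at this
    exact h3 this

-- ===== VERDICT (by name: the statement is the Claim_ definition above) =====
theorem f_spec : Claim_equal_f := by
  intro s _
  unfold Spec_f
  simp only [f, f_alt, pv_values_eq]
  rw [show List.length (PySem.Set.ofList s.toList)
        = (List.map (fun k => ((s.toList.count k : Nat) : Int)) (PySem.Set.ofList s.toList)).length
      from (List.length_map _).symm]
  apply pv_core
  intro x hx
  simp only [List.mem_map] at hx
  obtain ⟨k, hk, rfl⟩ := hx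
  rw [PySem.Set.mem_ofList] at hk
  have := List.count_pos_iff.mpr hk
  omega
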